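-- pv_equiv track=rewrite | github.com/GiacomoBertin/ChemicalSpaceSampler | Samplers.py | _subdivide_array
-- ===== SOURCE A (Python) =====
-- def _subdivide_array(a, n):
--     """
--     Subdivide the array a in n parts
--     :param a: input array
--     :param n: number of subdivisions
--     :return: n array
--     """
--     b = []
--     count = 0
--     for i in range(n):
--         b.append([])
--         for j in range(i * int(len(a) / n), (i + 1) * int(len(a) / n)):
--             if j < len(a):
--                 count += 1
--                 b[i].append(a[j])
--
--     for i in range(count, len(a)):
--         b[n - 1].append(a[i])
--     return b
-- ===== SOURCE B (Python) =====
-- def _subdivide_array(a, n):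
--     """Subdivide a into n contiguous parts by direct slicing; the last part absorbs the remainder."""
--     k = len(a) // n
--     return [list(a[i * k:(i + 1) * k]) for i in range(n - 1)] + [list(a[(n - 1) * k:])]
-- ===== Notes on version B (the rewrite author's own statement) =====
-- stated objective: simpler
-- what changed: Replaces A's element-by-element appends with count tracking plus a separate trailing-remainder loop by one slicing comprehension: n-1 direct block slices and a final slice that absorbs the remainder.
-- outside the precondition, e.g. on _subdivide_array([], 0): A returns [], B raises ZeroDivisionError; on _subdivide_array([], -2): A returns [], B returns [[]]
import Mathlib
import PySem

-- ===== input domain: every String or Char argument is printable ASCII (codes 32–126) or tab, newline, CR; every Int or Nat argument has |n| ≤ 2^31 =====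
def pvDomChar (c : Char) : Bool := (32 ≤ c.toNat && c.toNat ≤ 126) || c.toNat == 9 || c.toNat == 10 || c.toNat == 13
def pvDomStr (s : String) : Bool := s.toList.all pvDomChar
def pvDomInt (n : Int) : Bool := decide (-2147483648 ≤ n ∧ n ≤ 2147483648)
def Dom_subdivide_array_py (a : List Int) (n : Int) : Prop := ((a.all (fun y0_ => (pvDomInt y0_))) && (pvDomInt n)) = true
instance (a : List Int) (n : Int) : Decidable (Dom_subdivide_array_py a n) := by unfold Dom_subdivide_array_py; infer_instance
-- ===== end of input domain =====

-- B replaces A's element-by-element appends with count tracking (plus a separate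
-- trailing-remainder loop) by one slicing comprehension: simpler, not claimed faster.

-- ===== PORT A =====
-- 'int(len(a) / n)' is ported as PySem.Int.floordiv: it is only evaluated when the loop over
-- range(n) runs, i.e. n ≥ 1, where with 0 ≤ len(a) ≤ 2^31 the float division is exact enough
-- that int() of it equals the floor quotient.
def subdivide_array_py (a : List Int) (n : Int) : List (List Int) :=
  -- b = []; count = 0; for i in range(n): b.append([]); for j in range(i*k,(i+1)*k): if j < len(a): count += 1; b[i].append(a[j])
  let bc : List (List Int) × Int :=
    (PySem.List.pyRange 0 n 1).foldl
      (fun s i =>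
        let b := s.1 ++ [([] : List Int)]
        (PySem.List.pyRange (i * PySem.Int.floordiv (a.length : Int) n)
            ((i + 1) * PySem.Int.floordiv (a.length : Int) n) 1).foldl
          (fun t j =>
            if j < (a.length : Int) then
              (t.1.modify i.toNat (fun l => l ++ [PySem.List.pyGetD a j 0]), t.2 + 1)
            else t)
          (b, s.2))
      ([], 0)
  -- for i in range(count, len(a)): b[n-1].append(a[i])
  (PySem.List.pyRange bc.2 (a.length : Int) 1).foldl
    (fun b i => b.modify (n - 1).toNat (fun l => l ++ [PySem.List.pyGetD a i 0])) bc.1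

-- ===== PORT B =====
def subdivide_array_py_alt (a : List Int) (n : Int) : List (List Int) :=
  let k := PySem.Int.floordiv (a.length : Int) n
  ((PySem.List.pyRange 0 (n - 1) 1).map
      (fun i => PySem.List.slice a (some (i * k)) (some ((i + 1) * k)))) ++
    [PySem.List.slice a (some ((n - 1) * k)) none]

-- ===== PRECONDITION & SPEC =====
-- Pre_ excludes n ≤ 0: there A raises IndexError for nonempty a, and returns [] for empty a
-- only because its loops never run (B's division by n raises ZeroDivisionError at n = 0).
def Pre_subdivide_array_py (a : List Int) (n : Int) : Prop := 1 ≤ n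
instance (a : List Int) (n : Int) : Decidable (Pre_subdivide_array_py a n) := by unfold Pre_subdivide_array_py; infer_instance
def pvWitness_subdivide_array_py : List Int × Int := ([1, 2, 3, 4, 5], 2)
def Spec_subdivide_array_py (a : List Int) (n : Int) (out : List (List Int)) : Prop := out = subdivide_array_py_alt a n
instance (a : List Int) (n : Int) (out : List (List Int)) : Decidable (Spec_subdivide_array_py a n out) := by unfold Spec_subdivide_array_py; infer_instance

-- ===== CLAIM (what is proved, stated in full; the proofs are below) =====
def Claim_equal_subdivide_array_py : Prop := ∀ (a : List Int) (n : Int), Dom_subdivide_array_py a n → Pre_subdivide_array_py a n → Spec_subdivide_array_py a n (subdivide_array_py a n)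

-- ===== LEMMAS AND PROOFS =====

-- modify at the index of the last element of an append
lemma pv_modify_append (xs : List (List Int)) (y : List Int) (f : List Int → List Int) :
    (xs ++ [y]).modify xs.length f = xs ++ [f y] := by
  induction xs with
  | nil => rfl
  | cons x xs ih => simpa [List.modify] using ih

-- one appended element extends the taken block by one
lemma pv_take_snoc (a : List Int) (lo d : Nat) (hlo : lo < a.length) :
    [PySem.List.pyGetD a (lo : Int) 0] ++ (a.drop (lo + 1)).take d
      = (a.drop lo).take (d + 1) := by
  have hget : PySem.List.pyGetD a (lo : Int) 0 = a[lo] := by simp [hlo]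
  rw [hget, List.drop_eq_getElem_cons hlo, List.take_succ_cons]
  rfl

-- A's inner loop appends a contiguous block of a to the last slot and adds its length to count
lemma pv_inner_loop (a : List Int) (xs : List (List Int)) :
    ∀ (d lo : Nat) (y : List Int) (c : Int), lo + d ≤ a.length →
    (PySem.List.pyRange (lo : Int) ((lo : Int) + (d : Int)) 1).foldl
      (fun t j =>
        if j < (a.length : Int) then
          (t.1.modify xs.length (fun l => l ++ [PySem.List.pyGetD a j 0]), t.2 + 1)
        else t)
      (xs ++ [y], c)
    = (xs ++ [y ++ (a.drop lo).take d], c + d) := by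
  intro d
  induction d with
  | zero =>
    intro lo y c _
    rw [PySem.List.pyRange_one_eq_nil (by omega)]
    simp
  | succ d ih =>
    intro lo y c hle
    rw [PySem.List.pyRange_one_cons (by omega)]
    have hlo : lo < a.length := by omega
    simp only [List.foldl_cons]
    rw [if_pos (by exact_mod_cast hlo)]
    rw [pv_modify_append]
    have hstep := ih (lo + 1) (y ++ [PySem.List.pyGetD a (lo : Int) 0]) (c + 1) (by omega)
    rw [show ((lo : Int) + ((d : Nat) + 1 : Nat)) = ((lo + 1 : Nat) : Int) + (d : Int) by push_cast; ring,
        show ((lo : Int) + 1) = ((lo + 1 : Nat) : Int) by push_cast; ring, hstep]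
    simp only [Prod.mk.injEq]
    refine ⟨?_, by push_cast; ring⟩
    rw [List.append_assoc, pv_take_snoc a lo d hlo]

-- the trailing loop is the same block append with the count ignored
lemma pv_trailing_loop (a : List Int) (xs : List (List Int)) :
    ∀ (d lo : Nat) (y : List Int), lo + d ≤ a.length →
    (PySem.List.pyRange (lo : Int) ((lo : Int) + (d : Int)) 1).foldl
      (fun b i => b.modify xs.length (fun l => l ++ [PySem.List.pyGetD a i 0])) (xs ++ [y])
    = xs ++ [y ++ (a.drop lo).take d] := by
  intro d
  induction d with
  | zero =>
    intro lo y _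
    rw [PySem.List.pyRange_one_eq_nil (by omega)]
    simp
  | succ d ih =>
    intro lo y hle
    rw [PySem.List.pyRange_one_cons (by omega)]
    have hlo : lo < a.length := by omega
    simp only [List.foldl_cons]
    rw [pv_modify_append]
    rw [show ((lo : Int) + ((d : Nat) + 1 : Nat)) = ((lo + 1 : Nat) : Int) + (d : Int) by push_cast; ring,
        show ((lo : Int) + 1) = ((lo + 1 : Nat) : Int) by push_cast; ring,
        ih (lo + 1) (y ++ [PySem.List.pyGetD a (lo : Int) 0]) (by omega)]
    rw [List.append_assoc, pv_take_snoc a lo d hlo]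

-- A's outer loop over range(m) builds the m blocks of size k and count = m*k
lemma pv_outer_loop (a : List Int) (k : Nat) :
    ∀ (m : Nat), m * k ≤ a.length →
    (PySem.List.pyRange 0 (m : Int) 1).foldl
      (fun (s : List (List Int) × Int) i =>
        let b := s.1 ++ [([] : List Int)]
        (PySem.List.pyRange (i * (k : Int)) ((i + 1) * (k : Int)) 1).foldl
          (fun t j =>
            if j < (a.length : Int) then
              (t.1.modify i.toNat (fun l => l ++ [PySem.List.pyGetD a j 0]), t.2 + 1)
            else t)
          (b, s.2))
      ([], 0)
    = ((List.range m).map (fun t => (a.drop (t * k)).take k), ((m * k : Nat) : Int)) := by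
  intro m
  induction m with
  | zero => intro _; rw [show ((0 : Nat) : Int) = 0 by norm_num, PySem.List.pyRange_one_eq_nil (by omega)]; simp
  | succ m ih =>
    intro hle
    have hm : m * k ≤ a.length := by
      have := hle; rw [Nat.succ_mul] at this; omega
    rw [show ((m + 1 : Nat) : Int) = (m : Int) + 1 by push_cast; ring,
        PySem.List.pyRange_one_succ_right (by positivity), List.foldl_append, ih hm]
    simp only [List.foldl_cons, List.foldl_nil, Int.toNat_natCast]
    have hxs : ((List.range m).map (fun t => (a.drop (t * k)).take k)).length = m := by simp
    rw [show ((m : Int)) * (k : Int) = ((m * k : Nat) : Int) by push_cast; ring,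
        show ((m : Int) + 1) * (k : Int) = ((m * k : Nat) : Int) + ((k : Nat) : Int) by push_cast; ring]
    have hstep := pv_inner_loop a ((List.range m).map (fun t => (a.drop (t * k)).take k))
      k (m * k) [] ((m * k : Nat) : Int) (by rw [Nat.succ_mul] at hle; omega)
    rw [hxs] at hstep
    rw [hstep]
    simp only [Prod.mk.injEq]
    refine ⟨?_, by push_cast [Nat.succ_mul]; ring⟩
    rw [List.range_succ]
    simp

-- ===== VERDICT (by name: the statement is the Claim_ definition above) =====
theorem subdivide_array_py_spec : Claim_equal_subdivide_array_py := by
  intro a n _ hpre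
  unfold Spec_subdivide_array_py subdivide_array_py subdivide_array_py_alt
  have hn : 1 ≤ n := hpre
  set m : Nat := n.toNat with hm
  have hnm : n = (m : Int) := by omega
  set k : Nat := a.length / m with hk
  have hfdiv : PySem.Int.floordiv (a.length : Int) n = (k : Int) := by
    rw [hnm, hk]; exact_mod_cast PySem.Int.floordiv_natCast a.length m
  have hmpos : 1 ≤ m := by omega
  have hmk : m * k ≤ a.length := by
    rw [hk, Nat.mul_comm]; exact Nat.div_mul_le_self _ _
  rw [hfdiv, hnm]
  rw [pv_outer_loop a k m hmk]
  have hn1 : (m : Int) - 1 = ((m - 1 : Nat) : Int) := by omega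
  have hm1k : m * k = (m - 1) * k + k := by
    conv_lhs => rw [show m = (m - 1) + 1 by omega]
    rw [Nat.succ_mul]
  have hsplit : (List.range m).map (fun t => (a.drop (t * k)).take k)
      = (List.range (m - 1)).map (fun t => (a.drop (t * k)).take k)
        ++ [(a.drop ((m - 1) * k)).take k] := by
    conv_lhs => rw [show m = (m - 1) + 1 by omega, List.range_succ]
    simp
  have hlen : ((List.range (m - 1)).map (fun t => (a.drop (t * k)).take k)).length = m - 1 := by
    simp
  have htrail := pv_trailing_loop a ((List.range (m - 1)).map (fun t => (a.drop (t * k)).take k))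
      (a.length - m * k) (m * k) ((a.drop ((m - 1) * k)).take k) (by omega)
  rw [hlen] at htrail
  rw [show ((m * k : Nat) : Int) + ((a.length - m * k : Nat) : Int) = (a.length : Int) by omega]
    at htrail
  rw [hsplit, show ((m : Int) - 1).toNat = m - 1 by omega, htrail]
  congr 1
  · -- the m-1 leading blocks are B's slices
    rw [hn1, PySem.List.pyRange_zero_natCast, List.map_map]
    apply List.map_congr_left
    intro t _
    simp only [Function.comp]
    rw [show (t : Int) * (k : Int) = ((t * k : Nat) : Int) by push_cast; ring,
        show ((t : Int) + 1) * (k : Int) = ((t * k : Nat) : Int) + ((k : Nat) : Int) by push_cast; ring,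
        PySem.List.slice_natCast_add]
  · -- the last block: a[(m-1)k : mk] ++ a[mk:] = a[(m-1)k:]
    congr 1
    rw [hn1, show ((m - 1 : Nat) : Int) * (k : Int) = (((m - 1) * k : Nat) : Int) by push_cast; ring,
        PySem.List.slice_from_natCast]
    have h1 : (a.drop (m * k)).take (a.length - m * k) = a.drop (m * k) := by
      apply List.take_of_length_le; simp
    rw [h1, hm1k, ← List.drop_drop]
    exact List.take_append_drop k (a.drop ((m - 1) * k))
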